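-- pv_equiv track=rewrite | github.com/Akmalbek09/semester_1 | Lesson_34/Lesson_34.py | space_remover
-- ===== SOURCE A (Python) =====
-- def space_remover(txt):
--     txtt = ""
--     counter = 0
--     for x in txt:
--         counter += 1
--         if counter == len(txt):
--             txtt = txtt + x
--             break
--         elif x == " " and txt[counter] == " ":
--             continue
--         elif x == " " and txt[counter] == ".":
--             continue
--         else:
--             txtt = txtt + x
--     return txtt
-- ===== SOURCE B (Python) =====
-- def space_remover(txt):
--     # Run-based scan: jump over each maximal run of spaces in one inner scan,
--     # emitting at most one space per run (none when the run ends at a dot),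
--     # instead of deciding each character from its successor.
--     out = []
--     i = 0
--     n = len(txt)
--     while i < n:
--         c = txt[i]
--         if c != " ":
--             out.append(c)
--             i += 1
--             continue
--         j = i
--         while j < n and txt[j] == " ":
--             j += 1
--         if j == n or txt[j] != ".":
--             out.append(" ")
--         i = j
--     return "".join(out)
-- ===== Notes on version B (the rewrite author's own statement) =====
-- stated objective: alternative
-- what changed: Replaces A's per-character loop (which inspects each character's successor via an index counter and repeatedly concatenates onto the result string) by a run-based scan: an outer loop that copies non-space characters and, on meeting a space, an inner scan that jumps past the whole maximal run of spaces at once, emitting at most one space per run (none when the run ends at a dot), collecting output in a list joined once.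
import Mathlib
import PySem

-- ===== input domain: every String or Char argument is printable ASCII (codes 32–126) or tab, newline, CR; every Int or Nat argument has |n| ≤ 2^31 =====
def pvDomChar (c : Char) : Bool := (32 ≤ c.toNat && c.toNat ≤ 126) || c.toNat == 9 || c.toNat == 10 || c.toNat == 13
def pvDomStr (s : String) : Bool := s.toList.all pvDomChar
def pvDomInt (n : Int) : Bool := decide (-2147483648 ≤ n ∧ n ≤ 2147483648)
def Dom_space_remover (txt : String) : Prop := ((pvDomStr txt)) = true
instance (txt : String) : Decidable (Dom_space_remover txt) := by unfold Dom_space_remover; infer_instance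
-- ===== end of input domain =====

-- B replaces A's per-character loop with successor lookahead by a run-based scan that
-- jumps over each maximal run of spaces in one inner scan, emitting at most one space
-- per run (none when the run ends at a dot). Objective: alternative.

-- ===== PORT A =====
-- the for-loop over txt with counter, break on the last character, continue on redundant spaces
def spaceRemAux (xs : List Char) (txt : List Char) (counter : Nat) (acc : List Char) : List Char :=
  match xs with
  | [] => acc
  | x :: rest =>
    let c := counter + 1
    if c = txt.length then acc ++ [x]                -- break: rest is discarded
    else if x = ' ' ∧ PySem.List.pyGet? txt (c : Int) = some ' ' then spaceRemAux rest txt c acc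
    else if x = ' ' ∧ PySem.List.pyGet? txt (c : Int) = some '.' then spaceRemAux rest txt c acc
    else spaceRemAux rest txt c (acc ++ [x])

def space_remover (txt : String) : String :=
  String.ofList (spaceRemAux txt.toList txt.toList 0 [])

-- ===== PORT B =====
-- the inner `while j < n and txt[j] == " "` of Source B, ported on the suffix starting at j
def skipSpaces : List Char → List Char
  | [] => []
  | c :: rest => if c = ' ' then skipSpaces rest else c :: rest

lemma skipSpaces_length_le (l : List Char) : (skipSpaces l).length ≤ l.length := by
  induction l with
  | nil => simp [skipSpaces]
  | cons c rest ih =>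
    by_cases h : c = ' ' <;> simp [skipSpaces, h] <;> omega

-- the outer while of Source B, ported on the suffix starting at i; `out.append`/`join`
-- become list cons/append built left-to-right
def bRun (l : List Char) : List Char :=
  match l with
  | [] => []
  | c :: rest =>
    if c = ' ' then
      -- the inner scan starts at i and c is a space, so it continues from rest
      (match skipSpaces rest with
       | [] => [' ']                                  -- j == n
       | d :: _ => if d ≠ '.' then [' '] else []) ++ bRun (skipSpaces rest)
    else c :: bRun rest
termination_by l.length
decreasing_by
  · have := skipSpaces_length_le rest; simp; omega
  · simp

def space_remover_alt (txt : String) : String :=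
  String.ofList (bRun txt.toList)

-- ===== PRECONDITION & SPEC =====
def Spec_space_remover (txt : String) (out : String) : Prop := out = space_remover_alt txt
instance (txt : String) (out : String) : Decidable (Spec_space_remover txt out) := by unfold Spec_space_remover; infer_instance

-- ===== CLAIM (what is proved, stated in full; the proofs are below) =====
def Claim_equal_space_remover : Prop := ∀ (txt : String), Dom_space_remover txt → Spec_space_remover txt (space_remover txt)

-- ===== LEMMAS AND PROOFS =====

-- common recursive characterisation: keep a char unless it is a space followed by ' ' or '.'
def gRem : List Char → List Char
  | [] => []
  | [x] => [x]
  | x :: y :: r => (if x = ' ' ∧ (y = ' ' ∨ y = '.') then [] else [x]) ++ gRem (y :: r)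

lemma aux_eq_g : ∀ (xs txt : List Char) (c : Nat) (acc : List Char),
    txt.drop c = xs → spaceRemAux xs txt c acc = acc ++ gRem xs := by
  intro xs
  induction xs with
  | nil => intro txt c acc h; simp [spaceRemAux, gRem]
  | cons x rest ih =>
    intro txt c acc h
    have hc : c < txt.length := by
      by_contra hcc
      rw [List.drop_eq_nil_of_le (Nat.le_of_not_lt hcc)] at h
      simp at h
    have hlen : txt.length = c + 1 + rest.length := by
      have h' := congrArg List.length h
      simp [List.length_drop] at h'
      omega
    have hrest : txt.drop (c + 1) = rest := by
      rw [← List.tail_drop, h]; rfl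
    cases rest with
    | nil =>
      simp [spaceRemAux, gRem, hlen]
    | cons y r =>
      have hne : ¬ (c + 1 = txt.length) := by simp only [List.length_cons] at hlen; omega
      have hget : PySem.List.pyGet? txt ((c + 1 : Nat) : Int) = some y := by
        rw [PySem.List.pyGet?_natCast]
        have h2 : txt[c+1]? = (txt.drop (c+1)).head? := by simp [List.head?_drop]
        rw [h2, hrest]; rfl
      by_cases hx : x = ' ' ∧ (y = ' ' ∨ y = '.')
      · rcases hx with ⟨hx1, hy⟩
        cases hy with
        | inl hy =>
          rw [spaceRemAux]
          simp only [hne, if_false]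
          rw [if_pos ⟨hx1, by rw [hget, hy]⟩]
          rw [ih txt (c+1) acc hrest, gRem]
          simp [hx1, hy]
        | inr hy =>
          rw [spaceRemAux]
          simp only [hne, if_false]
          have h2 : ¬ (x = ' ' ∧ PySem.List.pyGet? txt ((c+1 : Nat) : Int) = some ' ') := by
            rw [hget]; rintro ⟨-, hcq⟩; simp at hcq; exact absurd (hy ▸ hcq) (by decide)
          rw [if_neg h2, if_pos ⟨hx1, by rw [hget, hy]⟩]
          rw [ih txt (c+1) acc hrest, gRem]
          simp [hx1, hy]
      · rw [spaceRemAux]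
        simp only [hne, if_false]
        have h2 : ¬ (x = ' ' ∧ PySem.List.pyGet? txt ((c+1 : Nat) : Int) = some ' ') := by
          rw [hget]; rintro ⟨hx1, hcq⟩; simp at hcq; exact hx ⟨hx1, Or.inl hcq⟩
        have h3 : ¬ (x = ' ' ∧ PySem.List.pyGet? txt ((c+1 : Nat) : Int) = some '.') := by
          rw [hget]; rintro ⟨hx1, hcq⟩; simp at hcq; exact hx ⟨hx1, Or.inr hcq⟩
        rw [if_neg h2, if_neg h3, ih txt (c+1) (acc ++ [x]) hrest, gRem]
        rw [if_neg hx]; simp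

lemma bRun_eq_g : ∀ (n : Nat) (l : List Char), l.length ≤ n → bRun l = gRem l := by
  intro n
  induction n with
  | zero =>
    intro l hl
    have : l = [] := List.eq_nil_of_length_eq_zero (Nat.le_zero.mp hl)
    subst this; simp [bRun, gRem]
  | succ n ih =>
    intro l hl
    match l with
    | [] => simp [bRun, gRem]
    | [x] =>
      by_cases hx : x = ' '
      · subst hx; rw [bRun]; simp [skipSpaces, gRem]; rw [bRun]
      · rw [bRun]; simp [hx, gRem, bRun]
    | x :: y :: r =>
      simp only [List.length_cons] at hl
      by_cases hx : x = ' '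
      · subst hx
        by_cases hy : y = ' '
        · subst hy
          rw [bRun, if_pos rfl]
          have hskip : skipSpaces (' ' :: r) = skipSpaces r := by simp [skipSpaces]
          rw [hskip]
          have hb : bRun (' ' :: r) = (match skipSpaces r with
              | [] => [' ']
              | d :: _ => if d ≠ '.' then [' '] else []) ++ bRun (skipSpaces r) := by
            rw [bRun, if_pos rfl]
          rw [← hb, ih (' ' :: r) (by simp; omega), gRem]
          simp
        · have hskip : skipSpaces (y :: r) = y :: r := by simp [skipSpaces, hy]
          rw [bRun, if_pos rfl, hskip]
          rw [ih (y :: r) (by simp; omega), gRem]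
          by_cases hd : y = '.'
          · simp [hd]
          · simp [hd, hy]
      · rw [bRun, if_neg hx, ih (y :: r) (by simp; omega), gRem]
        simp [hx]

-- ===== VERDICT (by name: the statement is the Claim_ definition above) =====
theorem space_remover_spec : Claim_equal_space_remover := by
  intro txt _
  unfold Spec_space_remover space_remover space_remover_alt
  rw [aux_eq_g txt.toList txt.toList 0 [] (by simp), bRun_eq_g txt.toList.length txt.toList le_rfl, List.nil_append]
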